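-- pv_equiv track=rewrite | github.com/HCIS-Lab/Affordance-Guided-Self-Consistent-MLLM | src/affordance/ours/agent.py | food_on_hand
-- ===== SOURCE A (Python) =====
-- def food_on_hand(action_seq):
--     """assume the robot has no food at the beginning"""
--     food = False
--     for action in action_seq:
--         if action == 'scoop':
--             food = True
--         elif action == 'drop_food':
--             food = False
--     return food
-- ===== SOURCE B (Python) =====
-- def food_on_hand(action_seq):
--     """assume the robot has no food at the beginning"""
--     rev = action_seq[::-1]
--     i_scoop = rev.index('scoop') if 'scoop' in rev else len(rev)
--     i_drop = rev.index('drop_food') if 'drop_food' in rev else len(rev)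
--     return i_scoop < i_drop
-- ===== Notes on version B (the rewrite author's own statement) =====
-- stated objective: alternative
-- what changed: Instead of folding a boolean over every action, B locates the most recent occurrence of each of the two relevant actions (via reverse + index) and returns whether the last 'scoop' comes after the last 'drop_food'.
import Mathlib
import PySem

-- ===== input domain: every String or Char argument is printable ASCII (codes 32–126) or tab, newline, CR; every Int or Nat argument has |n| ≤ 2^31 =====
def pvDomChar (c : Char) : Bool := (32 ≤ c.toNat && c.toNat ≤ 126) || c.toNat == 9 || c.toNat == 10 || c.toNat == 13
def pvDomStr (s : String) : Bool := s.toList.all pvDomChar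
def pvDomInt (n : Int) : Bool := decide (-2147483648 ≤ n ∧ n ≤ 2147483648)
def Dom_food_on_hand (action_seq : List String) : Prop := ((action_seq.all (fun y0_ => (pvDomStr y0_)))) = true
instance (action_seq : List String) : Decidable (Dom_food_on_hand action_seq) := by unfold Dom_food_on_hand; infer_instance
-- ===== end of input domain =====

-- ===== PORT A =====
-- One honest line: B finds the most recent occurrence of each relevant action and compares
-- their positions instead of folding a boolean over every action; same O(n) cost, alternative shape.
def food_on_hand (action_seq : List String) : Bool :=
  action_seq.foldl (fun food action =>
    if action == "scoop" then true
    else if action == "drop_food" then false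
    else food) false

-- ===== PORT B =====
-- action_seq[::-1] ported as List.reverse (exact: PySem.List.slice?_none_none_neg_one).
def food_on_hand_alt (action_seq : List String) : Bool :=
  let rev := action_seq.reverse
  let i_scoop : Nat :=
    if rev.contains "scoop" then (PySem.List.index? rev "scoop").getD 0 else rev.length
  let i_drop : Nat :=
    if rev.contains "drop_food" then (PySem.List.index? rev "drop_food").getD 0 else rev.length
  decide (i_scoop < i_drop)

-- ===== PRECONDITION & SPEC =====
def Spec_food_on_hand (action_seq : List String) (out : Bool) : Prop := out = food_on_hand_alt action_seq
instance (action_seq : List String) (out : Bool) : Decidable (Spec_food_on_hand action_seq out) := by unfold Spec_food_on_hand; infer_instance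

-- ===== CLAIM =====
def Claim_equal_food_on_hand : Prop := ∀ (action_seq : List String), Dom_food_on_hand action_seq → Spec_food_on_hand action_seq (food_on_hand action_seq)

-- ===== LEMMAS AND PROOFS =====

-- position of the last occurrence, as B computes it (on the reversed list)
def pvIdx (rev : List String) (t : String) : Nat :=
  if rev.contains t then (PySem.List.index? rev t).getD 0 else rev.length

theorem pvIdx_cons_self (rev : List String) (t : String) : pvIdx (t :: rev) t = 0 := by
  unfold pvIdx
  rw [PySem.List.index?_cons_self]
  simp

theorem pvIdx_cons_of_ne (rev : List String) (x t : String) (h : x ≠ t) :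
    pvIdx (x :: rev) t = pvIdx rev t + 1 := by
  unfold pvIdx
  have hne : (t == x) = false := beq_eq_false_iff_ne.mpr (Ne.symm h)
  have hc : (x :: rev).contains t = rev.contains t := by
    simp only [List.contains_cons, hne, Bool.false_or]
  rw [hc]
  by_cases hm : rev.contains t
  · have : t ∈ rev := by simpa using hm
    obtain ⟨k, hk⟩ := Option.isSome_iff_exists.mp
      ((PySem.List.index?_isSome_iff (xs := rev) (v := t)).mpr this)
    rw [hm, if_pos rfl, if_pos rfl, PySem.List.index?_cons_of_ne _ (by simpa using h), hk]
    simp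
  · rw [if_neg (by simpa using hm), if_neg (by simpa using hm)]
    simp

theorem fold_eq_idx (l : List String) :
    l.foldl (fun food action =>
      if action == "scoop" then true
      else if action == "drop_food" then false
      else food) false
    = decide (pvIdx l.reverse "scoop" < pvIdx l.reverse "drop_food") := by
  induction l using List.reverseRecOn with
  | nil => simp [pvIdx]
  | append_singleton xs x ih =>
    rw [List.foldl_append, List.foldl_cons, List.foldl_nil, ih, List.reverse_append]
    simp only [List.reverse_cons, List.reverse_nil, List.nil_append, List.singleton_append]
    by_cases hs : x = "scoop"
    · subst hs
      rw [pvIdx_cons_self, pvIdx_cons_of_ne _ _ _ (by decide)]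
      simp
    · by_cases hd : x = "drop_food"
      · subst hd
        rw [pvIdx_cons_self, pvIdx_cons_of_ne _ _ _ (by decide)]
        simp
      · rw [pvIdx_cons_of_ne _ _ _ hs, pvIdx_cons_of_ne _ _ _ hd]
        have h1 : (x == "scoop") = false := by simpa using hs
        have h2 : (x == "drop_food") = false := by simpa using hd
        simp [h1, h2]

-- ===== VERDICT =====
theorem food_on_hand_spec : Claim_equal_food_on_hand := by
  intro action_seq _
  unfold Spec_food_on_hand food_on_hand food_on_hand_alt
  simpa [pvIdx] using fold_eq_idx action_seq
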